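-- pv_equiv track=rewrite | github.com/jmnmv12/IA | Guiao_1/EX1_10.py | sub_set
-- ===== SOURCE A (Python) =====
-- def sub_set(list_a,):
--
--     if(list_a==[]):
--
--         return []
--     list_new=[]
--     list_new[:0]=[list_a] # adiciona a lista original
--     list_new[:0]=[[list_a[0],i] for ind,i in enumerate(list_a) if ind!=0 and [list_a[0],i] not in list_new]
--
--
--     #list_b
--     list_new[:0]=[[i] for i in list_a if i==list_a[0] and [i] not in list_new] #adiciona os elementos singulares
--     list_new[:0]=sub_set(list_a[1:])
--
--     #list_b=[i for i in list_new if len(i)==1]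
--     #list_new[:0]=list_b
--
--     return list_new
-- ===== SOURCE B (Python) =====
-- def sub_set(list_a):
--     # One pass over reversed(list_a), growing the current suffix and appending
--     # each suffix's block (singletons, pairs, the suffix itself) to the result.
--     res = []
--     sub = []
--     for x in reversed(list_a):
--         sub = [x] + sub
--         m = len(sub)
--         if m > 1:
--             res += [[x] for y in sub if y == x]
--         if m > 2:
--             res += [[x, y] for y in sub[1:]]
--         res.append(sub)
--     return res
-- ===== Notes on version B (the rewrite author's own statement) =====
-- stated objective: faster
-- what changed: Replaced A's recursion over the tail (each level rebuilding list_new via four front-insertions and a slice copy) with a single loop over reversed(list_a) that grows the current suffix and appends each suffix's block to one result list, the vestigial 'not in' guards resolved into explicit length conditions.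
import Mathlib
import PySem

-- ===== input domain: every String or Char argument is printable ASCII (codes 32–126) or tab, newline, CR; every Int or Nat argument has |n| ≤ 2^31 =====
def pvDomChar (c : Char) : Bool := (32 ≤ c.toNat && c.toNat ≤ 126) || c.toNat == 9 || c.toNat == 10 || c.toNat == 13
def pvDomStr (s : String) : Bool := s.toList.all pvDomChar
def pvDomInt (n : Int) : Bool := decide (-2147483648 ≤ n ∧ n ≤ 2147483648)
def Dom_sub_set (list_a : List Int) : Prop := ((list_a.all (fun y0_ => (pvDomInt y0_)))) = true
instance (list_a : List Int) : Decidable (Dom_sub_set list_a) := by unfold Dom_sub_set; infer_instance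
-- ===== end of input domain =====

-- B replaces A's recursion-with-slicing by a single pass over reversed(list_a)
-- that grows the current suffix and appends each suffix's block (alternative decomposition).

-- ===== PORT A =====
-- literal transliteration of A: recursion, with the two `not in list_new` guards kept
def sub_set (list_a : List Int) : List (List Int) :=
  match list_a with
  | [] => []
  | a :: t =>
      -- list_new = [list_a]
      let ln0 : List (List Int) := [a :: t]
      -- pairs comprehension, membership checked against ln0 (the list before insertion)
      let pairs : List (List Int) :=
        ((PySem.List.enumerate (a :: t) 0).filter
          (fun p => p.1 ≠ 0 ∧ [a, p.2] ∉ ln0)).map (fun p => [a, p.2])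
      let ln1 : List (List Int) := pairs ++ ln0
      -- singles comprehension, membership checked against ln1
      let singles : List (List Int) :=
        ((a :: t).filter (fun i => i = a ∧ [i] ∉ ln1)).map (fun i => [i])
      let ln2 : List (List Int) := singles ++ ln1
      sub_set t ++ ln2

-- ===== PORT B =====
-- one step of B's loop body: extend the suffix by x, append this suffix's block
def subSetAltStep (st : List (List Int) × List Int) (x : Int) :
    List (List Int) × List Int :=
  let sub := x :: st.2
  let m := sub.length
  let r1 := if m > 1 then st.1 ++ (sub.filter (fun y => y = x)).map (fun _ => [x]) else st.1
  let r2 := if m > 2 then r1 ++ sub.tail.map (fun y => [x, y]) else r1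
  (r2 ++ [sub], sub)

def sub_set_alt (list_a : List Int) : List (List Int) :=
  (list_a.reverse.foldl subSetAltStep ([], [])).1

-- ===== PRECONDITION & SPEC =====
def Spec_sub_set (list_a : List Int) (out : List (List Int)) : Prop := out = sub_set_alt list_a
instance (list_a : List Int) (out : List (List Int)) : Decidable (Spec_sub_set list_a out) := by unfold Spec_sub_set; infer_instance

-- ===== CLAIM (what is proved, stated in full; the proofs are below) =====
def Claim_equal_sub_set : Prop := ∀ (list_a : List Int), Dom_sub_set list_a → Spec_sub_set list_a (sub_set list_a)

-- ===== LEMMAS AND PROOFS =====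

theorem step_main (a : Int) (t : List Int) :
    subSetAltStep (sub_set t, t) a = (sub_set (a::t), a::t) := by
  match t with
  | [] => simp [subSetAltStep, sub_set, PySem.List.enumerate]
  | [b] =>
      by_cases hb : b = a <;>
        simp [subSetAltStep, sub_set, PySem.List.enumerate, hb, List.filter]
  | b :: c :: r =>
      have hpairs :
          ((PySem.List.enumerate (a::b::c::r) 0).filter
            (fun p => decide (p.1 ≠ 0 ∧ [a, p.2] ∉ [a::b::c::r]))).map (fun p => [a, p.2])
            = (b::c::r).map (fun i => [a, i]) := by
        rw [PySem.List.enumerate_cons]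
        rw [List.filter_cons]
        simp only [decide_eq_true_eq]
        rw [if_neg (by simp)]
        rw [List.filter_eq_self.mpr ?_]
        · rw [show (fun p : Int × Int => [a, p.2]) = (fun i => [a, i]) ∘ (fun p : Int × Int => p.2) from rfl,
            ← List.map_map, PySem.List.map_snd_enumerate]
        · intro p hp
          rcases (PySem.List.mem_enumerate_iff _ _ _).mp hp with ⟨k, hk, rfl⟩
          simp only [decide_eq_true_eq]
          refine ⟨by simp; omega, by simp⟩
      have hsingles :
          ((a::b::c::r).filter
            (fun i => decide (i = a ∧ [i] ∉ ((b::c::r).map (fun i => [a, i]) ++ [a::b::c::r])))).map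
              (fun i => [i])
            = ((a::b::c::r).filter (fun y => decide (y = a))).map (fun _ => [a]) := by
        rw [List.filter_congr (q := fun y => decide (y = a)) ?_]
        · apply List.map_congr_left
          intro i hi
          have := of_decide_eq_true (List.mem_filter.mp hi).2
          rw [this]
        · intro i hi
          simp
      unfold subSetAltStep
      simp only [sub_set]
      rw [hpairs, hsingles]
      simp [List.append_assoc]

theorem sub_set_foldl_invariant (l : List Int) :
    l.reverse.foldl subSetAltStep ([], []) = (sub_set l, l) := by
  induction l with
  | nil => rfl
  | cons a t ih =>
      rw [List.reverse_cons, List.foldl_append, ih]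
      simpa using step_main a t

-- ===== VERDICT (by name: the statement is the Claim_ definition above) =====
theorem sub_set_spec : Claim_equal_sub_set := by
  intro l _
  unfold Spec_sub_set sub_set_alt
  rw [sub_set_foldl_invariant]
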